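-- pv_equiv track=rewrite | github.com/rschwa6308/Project-Euler | euler98/euler98.py | make_square_anagram
-- ===== SOURCE A (Python) =====
-- def pattern(string):
--     pattern = []
--     map = {}
--     for char in string:
--         if char not in map:
--             map[char] = len(map)
--         pattern.append(map[char])
--
--     return pattern
--
-- def make_square_anagram(squares, a, b):
--     a_pattern = pattern(a)
--     b_pattern = pattern(b)
--     for s in squares:
--         if pattern(s) == a_pattern:
--             table = str.maketrans(a, s)
--             b_trans = b.translate(table)
--             if b_trans in squares:
--                 return (s, b_trans)
--
-- squares = []
-- ===== SOURCE B (Python) =====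
-- def pattern(string):
--     pattern = []
--     map = {}
--     for char in string:
--         if char not in map:
--             map[char] = len(map)
--         pattern.append(map[char])
--
--     return pattern
--
-- def make_square_anagram(squares, a, b):
--     index = {}
--     for s in squares:
--         index.setdefault(tuple(pattern(s)), []).append(s)
--     square_set = set(squares)
--     for s in index.get(tuple(pattern(a)), []):
--         b_trans = b.translate(str.maketrans(a, s))
--         if b_trans in square_set:
--             return (s, b_trans)
--     return None
-- ===== Notes on version B (the rewrite author's own statement) =====
-- stated objective: alternative
-- what changed: B precomputes a dict grouping the squares by their character pattern (tuple keys) plus a set of squares, then scans only the candidate group for a's pattern with set membership, instead of A's single scan that recomputes every pattern and does a linear list-membership search per matching candidate.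
import Mathlib
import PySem

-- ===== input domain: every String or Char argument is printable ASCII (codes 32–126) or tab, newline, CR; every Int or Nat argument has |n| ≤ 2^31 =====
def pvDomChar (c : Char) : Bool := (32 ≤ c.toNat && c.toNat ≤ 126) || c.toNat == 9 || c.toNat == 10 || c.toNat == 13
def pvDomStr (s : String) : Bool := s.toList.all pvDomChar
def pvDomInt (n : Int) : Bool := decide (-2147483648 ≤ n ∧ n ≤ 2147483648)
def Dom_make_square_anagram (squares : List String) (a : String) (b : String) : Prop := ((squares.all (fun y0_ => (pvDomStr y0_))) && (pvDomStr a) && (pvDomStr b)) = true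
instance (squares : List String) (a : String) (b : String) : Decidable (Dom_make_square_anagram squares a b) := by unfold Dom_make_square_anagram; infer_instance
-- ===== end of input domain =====

-- B indexes the squares by character pattern in a dict and tests membership in a set,
-- replacing A's per-candidate pattern recomputation and list scan; objective: alternative (different traversal, similar measured cost).


-- ===== PORT A =====
-- pattern(string): the char-equality pattern as a list of ints (map[char] is always present when read, so getD 0 is exact)
def patternP (s : List Char) : List Int :=
  (s.foldl (fun (acc : List Int × PySem.Dict Char Int) c =>
      let m := if acc.2.contains c then acc.2 else acc.2.insert c (acc.2.size : Int)
      (acc.1 ++ [(m.get? c).getD 0], m))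
    ([], PySem.Dict.empty)).1

-- str.maketrans(a, s): dict built from the zipped pairs, later pairs overwrite
def mkTable (a s : List Char) : PySem.Dict Char Char :=
  (a.zip s).foldl (fun d p => d.insert p.1 p.2) PySem.Dict.empty

-- b.translate(table): chars not in the table pass through
def pyTranslate (b : List Char) (t : PySem.Dict Char Char) : List Char :=
  b.map (fun c => (t.get? c).getD c)

def msaLoopA (squares : List String) (a : String) (aP : List Int) (b : String) : List String → Option (String × String)
  | [] => none
  | s :: rest =>
      if patternP s.toList = aP then
        let b_trans := String.ofList (pyTranslate b.toList (mkTable a.toList s.toList))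
        if b_trans ∈ squares then some (s, b_trans) else msaLoopA squares a aP b rest
      else msaLoopA squares a aP b rest

def make_square_anagram (squares : List String) (a : String) (b : String) : Option (String × String) :=
  let a_pattern := patternP a.toList
  let _b_pattern := patternP b.toList
  msaLoopA squares a a_pattern b squares

-- ===== PORT B =====
-- index.setdefault(tuple(pattern(s)), []).append(s)  for each square, in order
def buildIndex (squares : List String) : PySem.Dict (List Int) (List String) :=
  squares.foldl (fun d s => d.modify (patternP s.toList) [] (fun l => l ++ [s])) PySem.Dict.empty

def msaLoopB (sset : List String) (a : String) (b : String) : List String → Option (String × String)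
  | [] => none
  | s :: rest =>
      let b_trans := String.ofList (pyTranslate b.toList (mkTable a.toList s.toList))
      if b_trans ∈ sset then some (s, b_trans) else msaLoopB sset a b rest

def make_square_anagram_alt (squares : List String) (a : String) (b : String) : Option (String × String) :=
  msaLoopB (PySem.Set.ofList squares) a b
    (((buildIndex squares).get? (patternP a.toList)).getD [])

-- ===== PRECONDITION & SPEC =====
def Spec_make_square_anagram (squares : List String) (a : String) (b : String) (out : Option (String × String)) : Prop := out = make_square_anagram_alt squares a b
instance (squares : List String) (a : String) (b : String) (out : Option (String × String)) : Decidable (Spec_make_square_anagram squares a b out) := by unfold Spec_make_square_anagram; infer_instance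

-- ===== CLAIM (what is proved, stated in full; the proofs are below) =====
def Claim_equal_make_square_anagram : Prop := ∀ (squares : List String) (a : String) (b : String), Dom_make_square_anagram squares a b → Spec_make_square_anagram squares a b (make_square_anagram squares a b)

-- ===== LEMMAS AND PROOFS =====

theorem get?_modify_self {κ ν : Type} [BEq κ] [LawfulBEq κ] (d : PySem.Dict κ ν) (k : κ) (v : ν) (f : ν → ν) :
    (d.modify k v f).get? k = some (f ((d.get? k).getD v)) := by
  simp only [PySem.Dict.modify, PySem.Dict.getD, PySem.Dict.get?_insert_self]

theorem get?_modify_of_ne {κ ν : Type} [BEq κ] [LawfulBEq κ] (d : PySem.Dict κ ν) (k k' : κ) (v : ν) (f : ν → ν) (h : k' ≠ k) :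
    (d.modify k v f).get? k' = d.get? k' := by
  simp only [PySem.Dict.modify, PySem.Dict.getD, PySem.Dict.get?_insert_of_ne _ _ h]

theorem buildIndex_aux (k : List Int) (l : List String) :
    ∀ d : PySem.Dict (List Int) (List String),
    (((l.foldl (fun d s => d.modify (patternP s.toList) [] (fun g => g ++ [s])) d).get? k).getD [])
      = ((d.get? k).getD []) ++ l.filter (fun s => patternP s.toList == k) := by
  induction l with
  | nil => intro d; simp
  | cons s rest ih =>
    intro d
    simp only [List.foldl_cons, List.filter_cons, ih]
    by_cases hp : patternP s.toList = k
    · subst hp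
      rw [get?_modify_self]
      simp
    · rw [get?_modify_of_ne _ _ _ _ _ (Ne.symm hp)]
      simp [hp]

-- the index lookup for key k is exactly the in-order sublist of squares whose pattern is k
theorem buildIndex_getD (squares : List String) (k : List Int) :
    ((buildIndex squares).get? k).getD []
      = squares.filter (fun s => patternP s.toList == k) := by
  have h := buildIndex_aux k squares PySem.Dict.empty
  simpa [buildIndex, PySem.Dict.empty, PySem.Dict.get?] using h

theorem loopB_filter (squares sset : List String) (a : String) (aP : List Int) (b : String)
    (l : List String) (hset : ∀ x, x ∈ sset ↔ x ∈ squares) :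
    msaLoopA squares a aP b l
      = msaLoopB sset a b (l.filter (fun s => patternP s.toList == aP)) := by
  induction l with
  | nil => simp [msaLoopA, msaLoopB]
  | cons s rest ih =>
    by_cases hp : patternP s.toList = aP
    · simp only [List.filter_cons, hp, beq_self_eq_true, if_true, msaLoopA, msaLoopB]
      by_cases hm : String.ofList (pyTranslate b.toList (mkTable a.toList s.toList)) ∈ squares
      · rw [if_pos hm, if_pos ((hset _).mpr hm)]
      · rw [if_neg hm, if_neg (fun h => hm ((hset _).mp h)), ih]
    · simp only [List.filter_cons, msaLoopA]
      rw [if_neg hp, ih]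
      simp [hp]

-- ===== VERDICT (by name: the statement is the Claim_ definition above) =====
theorem make_square_anagram_spec : Claim_equal_make_square_anagram := by
  intro squares a b _
  unfold Spec_make_square_anagram make_square_anagram make_square_anagram_alt
  rw [buildIndex_getD]
  exact loopB_filter squares _ a _ b squares
    (fun x => (PySem.Set.mem_ofList squares x))
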